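-- pv_equiv track=rewrite | github.com/cloud-py-api/nextcloud-mcp-server | src/nc_mcp_server/tools/contacts.py | _strip_updated_fields
-- ===== SOURCE A (Python) =====
-- _GROUP_METADATA_FIELDS = {"X-ABLABEL"}
--
-- def _strip_updated_fields(lines: list[str], skip_fields: set[str]) -> list[str]:
--     """Remove lines whose vCard field name is in skip_fields.
--
--     Handles group prefixes (e.g. 'item1.EMAIL;TYPE=WORK:...' → field 'EMAIL')
--     and also removes orphaned group metadata (X-ABLabel etc.) when all
--     "real" properties in that group have been stripped.
--     """
--     group_real: dict[str, list[str]] = {}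
--     for line in lines:
--         raw_field = line.split(";")[0].split(":")[0].upper() if ":" in line else ""
--         if "." in raw_field:
--             group, field_name = raw_field.split(".", 1)
--             if field_name not in _GROUP_METADATA_FIELDS:
--                 group_real.setdefault(group, []).append(field_name)
--     orphan_groups: set[str] = set()
--     for group, fields in group_real.items():
--         if all(f in skip_fields for f in fields):
--             orphan_groups.add(group)
--     result: list[str] = []
--     for line in lines:
--         raw_field = line.split(";")[0].split(":")[0].upper() if ":" in line else ""
--         group = ""
--         field_name = raw_field
--         if "." in raw_field:
--             group, field_name = raw_field.split(".", 1)
--         if field_name in skip_fields: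
--             continue
--         if group and group in orphan_groups:
--             continue
--         result.append(line)
--     return result
-- ===== SOURCE B (Python) =====
-- _GROUP_METADATA_FIELDS = {"X-ABLABEL"}
--
-- def _strip_updated_fields(lines: list[str], skip_fields: set[str]) -> list[str]:
--     """Same result as A: one pass maintains two group-name sets (seen-with-real-field
--     and seen-with-surviving-real-field); orphans are their set difference; the output
--     is a single filter comprehension."""
--     groups_with_real: set[str] = set()
--     groups_surviving: set[str] = set()
--     for line in lines:
--         raw_field = line.split(";")[0].split(":")[0].upper() if ":" in line else ""
--         if "." in raw_field:
--             group, field_name = raw_field.split(".", 1)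
--             if field_name not in _GROUP_METADATA_FIELDS:
--                 groups_with_real.add(group)
--                 if field_name not in skip_fields:
--                     groups_surviving.add(group)
--     orphan_groups = groups_with_real - groups_surviving
--
--     def keep(line: str) -> bool:
--         raw_field = line.split(";")[0].split(":")[0].upper() if ":" in line else ""
--         group, field_name = "", raw_field
--         if "." in raw_field:
--             group, field_name = raw_field.split(".", 1)
--         return field_name not in skip_fields and not (group and group in orphan_groups)
--
--     return [line for line in lines if keep(line)]
-- ===== Notes on version B (the rewrite author's own statement) =====
-- stated objective: simpler
-- what changed: Replaces A's dict of per-group field lists plus a second all()-scan over its items by two group-name sets maintained incrementally in the first pass (groups with a real field / groups with a surviving real field); orphans are their set difference, and the output pass is a single filter comprehension.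
import Mathlib
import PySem

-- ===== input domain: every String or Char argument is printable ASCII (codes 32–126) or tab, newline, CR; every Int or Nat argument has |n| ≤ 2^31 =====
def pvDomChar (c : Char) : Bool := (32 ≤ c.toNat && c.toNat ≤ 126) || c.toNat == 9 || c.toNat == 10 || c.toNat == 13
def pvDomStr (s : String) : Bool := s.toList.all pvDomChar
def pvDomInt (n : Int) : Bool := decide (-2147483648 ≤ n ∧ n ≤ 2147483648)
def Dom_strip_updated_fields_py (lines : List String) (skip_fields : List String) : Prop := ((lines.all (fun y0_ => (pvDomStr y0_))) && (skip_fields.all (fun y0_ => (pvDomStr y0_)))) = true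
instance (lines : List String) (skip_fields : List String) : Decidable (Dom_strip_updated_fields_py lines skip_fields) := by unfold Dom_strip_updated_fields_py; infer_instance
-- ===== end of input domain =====

-- B replaces A's dict of per-group field lists + a second all()-scan over it by two incrementally
-- maintained group-name sets whose set difference is the orphan set, and emits the result with a
-- single filter; objective: simpler. Both programs are total; return values proved equal.

-- ===== PORT A =====
-- line.split(";")[0].split(":")[0].upper(): split(sep) on a nonempty separator always returns a
-- nonempty list, so Python's [0] never raises; ported as .headD "" (exact).
def pvRawField (line : String) : String :=
  if PySem.Str.isIn ":" line then
    PySem.Str.upper ((((PySem.Str.split? ((PySem.Str.split? line ";").getD [] |>.headD "") ":").getD []).headD ""))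
  else ""

-- raw_field.split(".", 1): with "." present in raw_field this is exactly [group, rest]
def pvSplitDot (raw : String) : String × String :=
  match PySem.Str.splitMax? raw "." 1 with
  | some (g :: f :: _) => (g, f)
  | _ => ("", raw)

def pvAGroups (lines : List String) : PySem.Dict String (List String) :=
  lines.foldl (fun d line =>
    let raw := pvRawField line
    if PySem.Str.isIn "." raw then
      let gf := pvSplitDot raw
      if gf.2 != "X-ABLABEL" then d.modify gf.1 [] (fun fs => fs ++ [gf.2]) else d
    else d) PySem.Dict.empty

def pvAOrphans (lines : List String) (skip_fields : List String) : PySem.Set String :=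
  (pvAGroups lines).items.foldl
    (fun s p => if p.2.all (fun f => skip_fields.contains f) then PySem.Set.add s p.1 else s)
    PySem.Set.empty

def strip_updated_fields_py (lines : List String) (skip_fields : List String) : List String :=
  let orphans := pvAOrphans lines skip_fields
  lines.foldl (fun res line =>
    let raw := pvRawField line
    let gf := if PySem.Str.isIn "." raw then pvSplitDot raw else ("", raw)
    if skip_fields.contains gf.2 then res
    else if gf.1 != "" && orphans.contains gf.1 then res
    else res ++ [line]) []

-- ===== PORT B =====
def pvParse (line : String) : String × String :=
  let raw := pvRawField line
  if PySem.Str.isIn "." raw then pvSplitDot raw else ("", raw)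

def pvBSets (lines : List String) (skip_fields : List String) :
    PySem.Set String × PySem.Set String :=
  lines.foldl (fun p line =>
    let raw := pvRawField line
    if PySem.Str.isIn "." raw then
      let gf := pvSplitDot raw
      if gf.2 != "X-ABLABEL" then
        (PySem.Set.add p.1 gf.1,
         if !skip_fields.contains gf.2 then PySem.Set.add p.2 gf.1 else p.2)
      else p
    else p) (PySem.Set.empty, PySem.Set.empty)

def strip_updated_fields_py_alt (lines : List String) (skip_fields : List String) : List String :=
  let p := pvBSets lines skip_fields
  let orphans := PySem.Set.diff p.1 p.2
  lines.filter (fun line =>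
    let gf := pvParse line
    !skip_fields.contains gf.2 && !(gf.1 != "" && orphans.contains gf.1))

-- ===== PRECONDITION & SPEC =====
def Spec_strip_updated_fields_py (lines : List String) (skip_fields : List String) (out : List String) : Prop := out = strip_updated_fields_py_alt lines skip_fields
instance (lines : List String) (skip_fields : List String) (out : List String) : Decidable (Spec_strip_updated_fields_py lines skip_fields out) := by unfold Spec_strip_updated_fields_py; infer_instance

-- ===== CLAIM (what is proved, stated in full; the proofs are below) =====
def Claim_equal_strip_updated_fields_py : Prop := ∀ (lines : List String) (skip_fields : List String), Dom_strip_updated_fields_py lines skip_fields → Spec_strip_updated_fields_py lines skip_fields (strip_updated_fields_py lines skip_fields)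

-- ===== LEMMAS AND PROOFS =====

-- the (group, field) pair a line contributes in the grouping pass, or none
def pvPair (line : String) : Option (String × String) :=
  let raw := pvRawField line
  if PySem.Str.isIn "." raw then
    let gf := pvSplitDot raw
    if gf.2 != "X-ABLABEL" then some gf else none
  else none

def pvPairs (lines : List String) : List (String × String) := lines.filterMap pvPair

lemma pvPairs_cons_none {line : String} (rest : List String) (h : pvPair line = none) :
    pvPairs (line :: rest) = pvPairs rest := by
  simp [pvPairs, h]

lemma pvPairs_cons_some {line : String} {gf : String × String} (rest : List String)
    (h : pvPair line = some gf) :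
    pvPairs (line :: rest) = gf :: pvPairs rest := by
  simp [pvPairs, h]

def pvStepA (d : PySem.Dict String (List String)) (line : String) :
    PySem.Dict String (List String) :=
  match pvPair line with
  | some gf => d.modify gf.1 [] (fun fs => fs ++ [gf.2])
  | none => d

def pvStepB (skip_fields : List String) (p : PySem.Set String × PySem.Set String)
    (line : String) : PySem.Set String × PySem.Set String :=
  match pvPair line with
  | some gf => (PySem.Set.add p.1 gf.1,
      if !skip_fields.contains gf.2 then PySem.Set.add p.2 gf.1 else p.2)
  | none => p

lemma stepA_eq :
    (fun (d : PySem.Dict String (List String)) (line : String) =>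
      let raw := pvRawField line
      if PySem.Str.isIn "." raw then
        let gf := pvSplitDot raw
        if gf.2 != "X-ABLABEL" then d.modify gf.1 [] (fun fs => fs ++ [gf.2]) else d
      else d) = pvStepA := by
  funext d line
  simp only [pvStepA, pvPair]
  split_ifs <;> rfl

lemma stepB_eq (skip_fields : List String) :
    (fun (p : PySem.Set String × PySem.Set String) (line : String) =>
      let raw := pvRawField line
      if PySem.Str.isIn "." raw then
        let gf := pvSplitDot raw
        if gf.2 != "X-ABLABEL" then
          (PySem.Set.add p.1 gf.1,
           if !skip_fields.contains gf.2 then PySem.Set.add p.2 gf.1 else p.2)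
        else p
      else p) = pvStepB skip_fields := by
  funext p line
  simp only [pvStepB, pvPair]
  by_cases h1 : PySem.Str.isIn "." (pvRawField line) = true
  · rw [if_pos h1, if_pos h1]
    by_cases h2 : ((pvSplitDot (pvRawField line)).2 != "X-ABLABEL") = true
    · rw [if_pos h2, if_pos h2]
    · rw [if_neg h2, if_neg h2]
  · rw [if_neg h1, if_neg h1]

lemma foldA_contains (lines : List String) (d : PySem.Dict String (List String)) (g : String) :
    (lines.foldl pvStepA d).contains g = true
    ↔ d.contains g = true ∨ ∃ q ∈ pvPairs lines, q.1 = g := by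
  induction lines generalizing d with
  | nil => simp [pvPairs]
  | cons line rest ih =>
    rw [List.foldl_cons]
    cases h : pvPair line with
    | none =>
      rw [show pvStepA d line = d by simp [pvStepA, h], ih, pvPairs_cons_none rest h]
    | some gf =>
      rw [show pvStepA d line = d.modify gf.1 [] (fun fs => fs ++ [gf.2]) by
            simp [pvStepA, h],
          ih, pvPairs_cons_some rest h]
      rw [PySem.Dict.contains_modify]
      constructor
      · rintro (h1 | h2)
        · rcases Bool.or_eq_true_iff.mp h1 with h3 | h3
          · exact Or.inr ⟨gf, List.mem_cons_self .., (beq_iff_eq.mp h3).symm⟩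
          · exact Or.inl h3
        · rcases h2 with ⟨q, hq, hqg⟩
          exact Or.inr ⟨q, List.mem_cons_of_mem _ hq, hqg⟩
      · rintro (h1 | ⟨q, hq, hqg⟩)
        · exact Or.inl (by simp [h1])
        · rcases List.mem_cons.mp hq with rfl | hq'
          · exact Or.inl (by simp [hqg])
          · exact Or.inr ⟨q, hq', hqg⟩

lemma foldA_getD (lines : List String) (d : PySem.Dict String (List String)) (g : String) :
    (lines.foldl pvStepA d).getD g []
    = d.getD g [] ++ ((pvPairs lines).filter (fun q => q.1 == g)).map Prod.snd := by
  induction lines generalizing d with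
  | nil => simp [pvPairs]
  | cons line rest ih =>
    rw [List.foldl_cons]
    cases h : pvPair line with
    | none =>
      rw [show pvStepA d line = d by simp [pvStepA, h], ih, pvPairs_cons_none rest h]
    | some gf =>
      rw [show pvStepA d line = d.modify gf.1 [] (fun fs => fs ++ [gf.2]) by
            simp [pvStepA, h],
          ih, pvPairs_cons_some rest h]
      simp only [List.filter_cons]
      by_cases hg : gf.1 = g
      · simp [PySem.Dict.modify, hg]
      · simp [PySem.Dict.modify, PySem.Dict.getD_insert, hg, Ne.symm hg]

lemma foldA_nodup (lines : List String) (d : PySem.Dict String (List String))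
    (hd : d.keys.Nodup) : (lines.foldl pvStepA d).keys.Nodup := by
  induction lines generalizing d with
  | nil => simpa using hd
  | cons line rest ih =>
    rw [List.foldl_cons]
    cases h : pvPair line with
    | none => rw [show pvStepA d line = d by simp [pvStepA, h]]; exact ih d hd
    | some gf =>
      rw [show pvStepA d line = d.modify gf.1 [] (fun fs => fs ++ [gf.2]) by
            simp [pvStepA, h]]
      exact ih _ (PySem.Dict.nodup_keys_insert _ _ _ hd)

lemma mem_foldl_add_if {β : Type} (L : List β) (s : PySem.Set String)
    (key : β → String) (c : β → Bool) (g : String) :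
    g ∈ L.foldl (fun s b => if c b then PySem.Set.add s (key b) else s) s
    ↔ g ∈ s ∨ ∃ b ∈ L, key b = g ∧ c b = true := by
  induction L generalizing s with
  | nil => simp
  | cons b L ih =>
    simp only [List.foldl_cons]
    by_cases hb : c b = true
    · rw [if_pos hb, ih]
      simp only [PySem.Set.mem_add, List.mem_cons]
      constructor
      · rintro ((h | h) | h)
        · exact Or.inl h
        · exact Or.inr ⟨b, Or.inl rfl, h.symm, hb⟩
        · rcases h with ⟨b', hb', h1, h2⟩; exact Or.inr ⟨b', Or.inr hb', h1, h2⟩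
      · rintro (h | ⟨b', hb' | hb', h1, h2⟩)
        · exact Or.inl (Or.inl h)
        · subst hb'; exact Or.inl (Or.inr h1.symm)
        · exact Or.inr ⟨b', hb', h1, h2⟩
    · rw [if_neg hb, ih]
      simp only [List.mem_cons]
      constructor
      · rintro (h | h)
        · exact Or.inl h
        · rcases h with ⟨b', hb', h1, h2⟩; exact Or.inr ⟨b', Or.inr hb', h1, h2⟩
      · rintro (h | ⟨b', hb' | hb', h1, h2⟩)
        · exact Or.inl h
        · subst hb'; exact absurd h2 hb
        · exact Or.inr ⟨b', hb', h1, h2⟩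

lemma dict_contains_iff_exists_item {ν : Type} (d : PySem.Dict String ν) (g : String) :
    d.contains g = true ↔ ∃ p ∈ d.items, p.1 = g := by
  simp [PySem.Dict.contains, List.any_eq_true, beq_iff_eq]

-- characterisation of A's orphan set in terms of the contributed (group, field) pairs
lemma pvAOrphans_mem (lines skip_fields : List String) (g : String) :
    g ∈ pvAOrphans lines skip_fields
    ↔ (∃ q ∈ pvPairs lines, q.1 = g)
      ∧ ∀ q ∈ pvPairs lines, q.1 = g → skip_fields.contains q.2 = true := by
  unfold pvAOrphans pvAGroups
  rw [stepA_eq]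
  rw [mem_foldl_add_if ((lines.foldl pvStepA PySem.Dict.empty).items) PySem.Set.empty
      Prod.fst (fun p => p.2.all (fun f => skip_fields.contains f)) g]
  have hnodup := foldA_nodup lines PySem.Dict.empty PySem.Dict.nodup_keys_empty
  have hgetD := foldA_getD lines PySem.Dict.empty g
  have hcont := foldA_contains lines PySem.Dict.empty g
  rw [PySem.Dict.getD_empty] at hgetD
  simp only [List.nil_append] at hgetD
  rw [PySem.Dict.contains_empty] at hcont
  simp only [Bool.false_eq_true, false_or] at hcont
  constructor
  · rintro (h | ⟨p, hp, hkey, hall⟩)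
    · simp [PySem.Set.empty] at h
    · have hget : (lines.foldl pvStepA PySem.Dict.empty).get? p.1 = some p.2 :=
        PySem.Dict.get?_of_mem_items _ hp hnodup
      have hc : (lines.foldl pvStepA PySem.Dict.empty).contains g = true :=
        (dict_contains_iff_exists_item _ g).mpr ⟨p, hp, hkey⟩
      refine ⟨hcont.mp hc, ?_⟩
      intro q hq hqg
      have hgd : (lines.foldl pvStepA PySem.Dict.empty).getD g [] = p.2 := by
        subst hkey; simp [PySem.Dict.getD, hget]
      have hp2 : p.2 = ((pvPairs lines).filter (fun q => q.1 == g)).map Prod.snd := by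
        rw [← hgd, hgetD]
      rw [List.all_eq_true] at hall
      apply hall
      rw [hp2]
      simp only [List.mem_map, List.mem_filter]
      exact ⟨q, ⟨hq, by simp [hqg]⟩, rfl⟩
  · rintro ⟨hex, hall⟩
    right
    have hc : (lines.foldl pvStepA PySem.Dict.empty).contains g = true := hcont.mpr hex
    rcases (dict_contains_iff_exists_item _ g).mp hc with ⟨p, hp, hkey⟩
    refine ⟨p, hp, hkey, ?_⟩
    have hget : (lines.foldl pvStepA PySem.Dict.empty).get? p.1 = some p.2 :=
      PySem.Dict.get?_of_mem_items _ hp hnodup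
    have hgd : (lines.foldl pvStepA PySem.Dict.empty).getD g [] = p.2 := by
      subst hkey; simp [PySem.Dict.getD, hget]
    have hp2 : p.2 = ((pvPairs lines).filter (fun q => q.1 == g)).map Prod.snd := by
      rw [← hgd, hgetD]
    rw [List.all_eq_true]
    intro f hf
    rw [hp2] at hf
    simp only [List.mem_map, List.mem_filter, beq_iff_eq] at hf
    rcases hf with ⟨q, ⟨hq, hqg⟩, rfl⟩
    exact hall q hq hqg

lemma foldB_mem (skip_fields : List String) (lines : List String)
    (p : PySem.Set String × PySem.Set String) (g : String) :
    (g ∈ (lines.foldl (pvStepB skip_fields) p).1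
       ↔ g ∈ p.1 ∨ ∃ q ∈ pvPairs lines, q.1 = g)
    ∧ (g ∈ (lines.foldl (pvStepB skip_fields) p).2
       ↔ g ∈ p.2 ∨ ∃ q ∈ pvPairs lines, q.1 = g ∧ skip_fields.contains q.2 = false) := by
  induction lines generalizing p with
  | nil => simp [pvPairs]
  | cons line rest ih =>
    rw [List.foldl_cons]
    cases h : pvPair line with
    | none =>
      rw [show pvStepB skip_fields p line = p by simp [pvStepB, h]]
      rcases ih p with ⟨ih1, ih2⟩
      exact ⟨by rw [ih1, pvPairs_cons_none rest h],
             by rw [ih2, pvPairs_cons_none rest h]⟩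
    | some gf =>
      by_cases hs : skip_fields.contains gf.2 = false
      · have hs2 : gf.2 ∉ skip_fields := by simpa using hs
        rw [show pvStepB skip_fields p line
              = (PySem.Set.add p.1 gf.1, PySem.Set.add p.2 gf.1) from by
            simp [pvStepB, h, hs2]]
        rcases ih (PySem.Set.add p.1 gf.1, PySem.Set.add p.2 gf.1) with ⟨ih1, ih2⟩
        constructor
        · rw [ih1, pvPairs_cons_some rest h]
          simp only [PySem.Set.mem_add, List.mem_cons]
          constructor
          · rintro ((h1 | h1) | ⟨q, hq, hqg⟩)
            · exact Or.inl h1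
            · exact Or.inr ⟨gf, Or.inl rfl, h1.symm⟩
            · exact Or.inr ⟨q, Or.inr hq, hqg⟩
          · rintro (h1 | ⟨q, hq | hq, hqg⟩)
            · exact Or.inl (Or.inl h1)
            · subst hq; exact Or.inl (Or.inr hqg.symm)
            · exact Or.inr ⟨q, hq, hqg⟩
        · rw [ih2, pvPairs_cons_some rest h]
          simp only [PySem.Set.mem_add, List.mem_cons]
          constructor
          · rintro ((h1 | h1) | ⟨q, hq, hqg⟩)
            · exact Or.inl h1
            · exact Or.inr ⟨gf, Or.inl rfl, h1.symm, hs⟩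
            · exact Or.inr ⟨q, Or.inr hq, hqg⟩
          · rintro (h1 | ⟨q, hq | hq, hqg, hqs⟩)
            · exact Or.inl (Or.inl h1)
            · subst hq; exact Or.inl (Or.inr hqg.symm)
            · exact Or.inr ⟨q, hq, hqg, hqs⟩
      · have hs' : skip_fields.contains gf.2 = true := by
          revert hs; cases skip_fields.contains gf.2 <;> simp
        have hs2 : gf.2 ∈ skip_fields := by simpa using hs'
        rw [show pvStepB skip_fields p line = (PySem.Set.add p.1 gf.1, p.2) from by
            simp [pvStepB, h, hs2]]
        rcases ih (PySem.Set.add p.1 gf.1, p.2) with ⟨ih1, ih2⟩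
        constructor
        · rw [ih1, pvPairs_cons_some rest h]
          simp only [PySem.Set.mem_add, List.mem_cons]
          constructor
          · rintro ((h1 | h1) | ⟨q, hq, hqg⟩)
            · exact Or.inl h1
            · exact Or.inr ⟨gf, Or.inl rfl, h1.symm⟩
            · exact Or.inr ⟨q, Or.inr hq, hqg⟩
          · rintro (h1 | ⟨q, hq | hq, hqg⟩)
            · exact Or.inl (Or.inl h1)
            · subst hq; exact Or.inl (Or.inr hqg.symm)
            · exact Or.inr ⟨q, hq, hqg⟩
        · rw [ih2, pvPairs_cons_some rest h]
          simp only [List.mem_cons]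
          constructor
          · rintro (h1 | ⟨q, hq, hqg⟩)
            · exact Or.inl h1
            · exact Or.inr ⟨q, Or.inr hq, hqg⟩
          · rintro (h1 | ⟨q, hq | hq, hqg, hqs⟩)
            · exact Or.inl h1
            · subst hq; rw [hs'] at hqs; cases hqs
            · exact Or.inr ⟨q, hq, hqg, hqs⟩

lemma pvBSets_mem1 (lines skip_fields : List String) (g : String) :
    g ∈ (pvBSets lines skip_fields).1 ↔ ∃ q ∈ pvPairs lines, q.1 = g := by
  unfold pvBSets
  rw [stepB_eq]
  have h := (foldB_mem skip_fields lines (PySem.Set.empty, PySem.Set.empty) g).1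
  simpa [PySem.Set.empty] using h

lemma pvBSets_mem2 (lines skip_fields : List String) (g : String) :
    g ∈ (pvBSets lines skip_fields).2
    ↔ ∃ q ∈ pvPairs lines, q.1 = g ∧ skip_fields.contains q.2 = false := by
  unfold pvBSets
  rw [stepB_eq]
  have h := (foldB_mem skip_fields lines (PySem.Set.empty, PySem.Set.empty) g).2
  simpa [PySem.Set.empty] using h

-- A's orphan set and B's set difference agree element by element
lemma orphans_eq (lines skip_fields : List String) (g : String) :
    (pvAOrphans lines skip_fields).contains g
    = (PySem.Set.diff (pvBSets lines skip_fields).1 (pvBSets lines skip_fields).2).contains g := by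
  rw [Bool.eq_iff_iff, PySem.Set.contains_iff, PySem.Set.contains_iff]
  rw [pvAOrphans_mem]
  simp only [PySem.Set.diff, List.mem_filter]
  constructor
  · rintro ⟨hex, hall⟩
    refine ⟨(pvBSets_mem1 lines skip_fields g).mpr hex, ?_⟩
    rw [Bool.not_eq_eq_eq_not, Bool.not_true, ← Bool.not_eq_true, PySem.Set.contains_iff,
      pvBSets_mem2]
    rintro ⟨q, hq, hqg, hqs⟩
    rw [hall q hq hqg] at hqs; cases hqs
  · rintro ⟨hmem, hnot⟩
    refine ⟨(pvBSets_mem1 lines skip_fields g).mp hmem, ?_⟩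
    intro q hq hqg
    by_contra hc
    rw [Bool.not_eq_true] at hc
    have hm : g ∈ (pvBSets lines skip_fields).2 :=
      (pvBSets_mem2 lines skip_fields g).mpr ⟨q, hq, hqg, hc⟩
    rw [← PySem.Set.contains_iff] at hm
    rw [hm] at hnot
    cases hnot

-- A's foldl-with-continue output pass is a filter
lemma foldl_skip_skip_append (L : List String) (acc : List String) (c1 c2 : String → Bool) :
    L.foldl (fun res line => if c1 line then res else if c2 line then res
      else res ++ [line]) acc
    = acc ++ L.filter (fun line => !c1 line && !c2 line) := by
  induction L generalizing acc with
  | nil => simp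
  | cons line rest ih =>
    simp only [List.foldl_cons, List.filter_cons]
    by_cases h1 : c1 line = true
    · simp [h1, ih]
    · by_cases h2 : c2 line = true
      · simp [h1, h2, ih]
      · simp [h1, h2, ih]

-- ===== VERDICT (by name: the statement is the Claim_ definition above) =====
theorem strip_updated_fields_py_spec : Claim_equal_strip_updated_fields_py := by
  intro lines skip_fields _
  unfold Spec_strip_updated_fields_py
  unfold strip_updated_fields_py strip_updated_fields_py_alt
  simp only []
  rw [foldl_skip_skip_append]
  simp only [List.nil_append]
  apply List.filter_congr
  intro line _
  simp only [pvParse]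
  rw [orphans_eq lines skip_fields]
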